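-- pv_equiv track=rewrite | github.com/mitu24472/Atcoder | ABC/Atcoder Beginner Contest 306/F.py | f
-- ===== SOURCE A (Python) =====
-- import bisect,random
--
-- def f(Si,Sj):
--     ans = 0
--     C = Si.copy()
--     C.extend(Sj)
--     C.sort()
--     # O(MlogM)
--     for s in Si:
--         ans += bisect.bisect(C,s)
--     return ans
-- ===== SOURCE B (Python) =====
-- def f(Si, Sj):
--     A = sorted(Si)
--     B = sorted(Sj)
--     n = len(A)
--     m = len(B)
--     i = j = 0
--     ans = 0
--     for s in A:
--         while i < n and A[i] <= s:
--             i += 1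
--         while j < m and B[j] <= s:
--             j += 1
--         ans += i + j
--     return ans
-- ===== Notes on version B (the rewrite author's own statement) =====
-- stated objective: faster
-- what changed: Instead of sorting the concatenation and running a binary search (bisect) for every element of Si, B sorts Si and Sj separately and does one linear two-pointer sweep over sorted Si, advancing monotone pointers into sorted Si and sorted Sj that count elements <= s; the per-element binary searches disappear.
import Mathlib
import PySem

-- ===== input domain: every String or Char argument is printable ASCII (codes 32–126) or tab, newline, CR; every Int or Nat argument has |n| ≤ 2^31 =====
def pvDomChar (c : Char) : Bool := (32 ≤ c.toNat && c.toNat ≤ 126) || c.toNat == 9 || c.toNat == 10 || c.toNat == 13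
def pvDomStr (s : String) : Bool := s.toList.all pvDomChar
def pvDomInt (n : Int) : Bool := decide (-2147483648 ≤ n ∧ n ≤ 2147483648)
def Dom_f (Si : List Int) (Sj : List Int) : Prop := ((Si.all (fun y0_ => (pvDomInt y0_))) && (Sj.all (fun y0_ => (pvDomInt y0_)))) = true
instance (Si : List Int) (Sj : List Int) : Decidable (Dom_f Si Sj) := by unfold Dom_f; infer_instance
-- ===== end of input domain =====

-- B replaces A's per-element binary search in the sorted concatenation by a single two-pointer
-- sweep over sorted copies of Si and Sj; neither version mutates its arguments.

-- ===== PORT A =====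
def f (Si : List Int) (Sj : List Int) : Int :=
  -- C = Si.copy(); C.extend(Sj); C.sort()
  let C := PySem.List.sorted (Si ++ Sj) (fun x => x) false
  Si.foldl (fun ans s => ans + (PySem.List.bisectRight C s : Int)) 0

-- ===== PORT B =====
-- the inner `while i < n and A[i] <= s: i += 1` loops of Source B
def advPtr (ys : List Int) (s : Int) (j : Nat) : Nat :=
  if h : j < ys.length then
    if ys[j] ≤ s then advPtr ys s (j + 1) else j
  else j
termination_by ys.length - j

def f_alt (Si : List Int) (Sj : List Int) : Int :=
  let A := PySem.List.sorted Si (fun x => x) false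
  let B := PySem.List.sorted Sj (fun x => x) false
  (A.foldl (fun (st : Nat × Nat × Int) s =>
      let i := advPtr A s st.1
      let j := advPtr B s st.2.1
      (i, j, st.2.2 + (i : Int) + (j : Int))) (0, 0, 0)).2.2

-- ===== PRECONDITION & SPEC =====
def Spec_f (Si : List Int) (Sj : List Int) (out : Int) : Prop := out = f_alt Si Sj
instance (Si : List Int) (Sj : List Int) (out : Int) : Decidable (Spec_f Si Sj out) := by unfold Spec_f; infer_instance

-- ===== CLAIM (what is proved, stated in full; the proofs are below) =====
def Claim_equal_f : Prop := ∀ (Si : List Int) (Sj : List Int), Dom_f Si Sj → Spec_f Si Sj (f Si Sj)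

-- ===== LEMMAS AND PROOFS =====

-- on a sorted list, bisect_right x = the number of elements ≤ x
theorem bisectRight_eq_countP (ys : List Int) (x : Int) (h : ys.Pairwise (· ≤ ·)) :
    PySem.List.bisectRight ys x = ys.countP (fun t => decide (t ≤ x)) := by
  obtain ⟨hk, h1, h2⟩ := PySem.List.bisectRight_spec ys x h
  set k := PySem.List.bisectRight ys x with hkdef
  have hsplit : ys.countP (fun t => decide (t ≤ x))
      = (ys.take k).countP (fun t => decide (t ≤ x)) + (ys.drop k).countP (fun t => decide (t ≤ x)) := by
    rw [← List.countP_append, List.take_append_drop]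
  have htake : (ys.take k).countP (fun t => decide (t ≤ x)) = (ys.take k).length := by
    apply List.countP_eq_length.2
    intro a ha
    obtain ⟨m, hm, rfl⟩ := List.mem_iff_getElem.1 ha
    have hm' : m < k ∧ m < ys.length := by simp [List.length_take] at hm; omega
    rw [List.getElem_take]
    simpa using h1 m hm'.2 hm'.1
  have hdrop : (ys.drop k).countP (fun t => decide (t ≤ x)) = 0 := by
    apply List.countP_eq_zero.2
    intro a ha
    obtain ⟨m, hm, rfl⟩ := List.mem_iff_getElem.1 ha
    have hm' : k + m < ys.length := by simp [List.length_drop] at hm; omega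
    rw [List.getElem_drop]
    simpa using not_le.2 (h2 (k + m) hm' (Nat.le_add_right _ _))
  rw [hsplit, htake, hdrop, List.length_take]
  omega

-- the while loop lands exactly on the count of elements ≤ x, from any start not past it
theorem advPtr_eq (ys : List Int) (x : Int) (h : ys.Pairwise (· ≤ ·)) :
    ∀ (j : Nat), j ≤ ys.countP (fun t => decide (t ≤ x)) →
      advPtr ys x j = ys.countP (fun t => decide (t ≤ x)) := by
  obtain ⟨hk, h1, h2⟩ := PySem.List.bisectRight_spec ys x h
  rw [bisectRight_eq_countP ys x h] at hk h1 h2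
  set k := ys.countP (fun t => decide (t ≤ x)) with hkdef
  have main : ∀ (fuel j : Nat), ys.length - j ≤ fuel → j ≤ k → advPtr ys x j = k := by
    intro fuel
    induction fuel with
    | zero =>
      intro j hf hj
      have hjk : j = k := by omega
      rw [advPtr]
      have : ¬ j < ys.length := by omega
      rw [dif_neg this]
      exact hjk
    | succ n ih =>
      intro j hf hj
      rw [advPtr]
      by_cases hlen : j < ys.length
      · simp only [hlen, dif_pos]
        by_cases hle : ys[j] ≤ x
        · simp only [hle, if_pos]
          have hjk : j < k := by
            rcases Nat.lt_or_ge j k with h' | h'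
            · exact h'
            · exact absurd (h2 j hlen h') (not_lt.2 hle)
          exact ih (j + 1) (by omega) (by omega)
        · simp only [hle, if_neg, not_false_iff]
          rcases Nat.lt_or_ge j k with h' | h'
          · exact absurd (h1 j hlen h') hle
          · omega
      · simp only [hlen, dif_neg, not_false_iff]
        omega
  intro j hj
  exact main (ys.length - j) j le_rfl hj

-- the two-pointer sweep computes the sum of the two counts for every s of the scanned list
theorem sweep (A0 B0 : List Int) (hA : A0.Pairwise (· ≤ ·)) (hB : B0.Pairwise (· ≤ ·)) :
    ∀ (rest : List Int) (i j : Nat) (ans : Int),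
      rest.Pairwise (· ≤ ·) →
      (∀ s ∈ rest, i ≤ A0.countP (fun t => decide (t ≤ s)) ∧ j ≤ B0.countP (fun t => decide (t ≤ s))) →
      (rest.foldl (fun (st : Nat × Nat × Int) s =>
          let i := advPtr A0 s st.1
          let j := advPtr B0 s st.2.1
          (i, j, st.2.2 + (i : Int) + (j : Int))) (i, j, ans)).2.2
        = ans + (rest.map (fun s =>
            ((A0.countP (fun t => decide (t ≤ s)) : Int) + (B0.countP (fun t => decide (t ≤ s)) : Int)))).sum := by
  intro rest
  induction rest with
  | nil => intro i j ans _ _; simp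
  | cons s t ih =>
    intro i j ans hpw hinv
    obtain ⟨hst, hpt⟩ := List.pairwise_cons.1 hpw
    have hs := hinv s (List.mem_cons_self ..)
    have hiA := advPtr_eq A0 s hA i hs.1
    have hjB := advPtr_eq B0 s hB j hs.2
    simp only [List.foldl_cons, List.map_cons, List.sum_cons, hiA, hjB]
    rw [ih _ _ _ hpt ?_]
    · ring
    · intro s' hs'
      have hss' : s ≤ s' := hst s' hs'
      constructor
      · exact List.countP_mono_left (fun a _ ha => by simp at ha ⊢; omega)
      · exact List.countP_mono_left (fun a _ ha => by simp at ha ⊢; omega)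

theorem f_eq_f_alt (Si Sj : List Int) : f Si Sj = f_alt Si Sj := by
  unfold f f_alt
  have hC : (PySem.List.sorted (Si ++ Sj) (fun x => x) false).Pairwise (· ≤ ·) :=
    PySem.List.sorted_pairwise _ _
  have hA : (PySem.List.sorted Si (fun x => x) false).Pairwise (· ≤ ·) :=
    PySem.List.sorted_pairwise _ _
  have hB : (PySem.List.sorted Sj (fun x => x) false).Pairwise (· ≤ ·) :=
    PySem.List.sorted_pairwise _ _
  -- A side: fold of additions is a sum, and bisect on the sorted concatenation is a count over Si ++ Sj
  rw [PySem.List.foldl_add]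
  rw [sweep _ _ hA hB _ 0 0 0 hA (fun s _ => ⟨Nat.zero_le _, Nat.zero_le _⟩)]
  have hmapA : Si.map (fun s => (PySem.List.bisectRight (PySem.List.sorted (Si ++ Sj) (fun x => x) false) s : Int))
      = Si.map (fun s => ((Si.countP (fun t => decide (t ≤ s)) : Int) + (Sj.countP (fun t => decide (t ≤ s)) : Int))) := by
    apply List.map_congr_left
    intro s _
    rw [bisectRight_eq_countP _ s hC,
      (PySem.List.sorted_perm (Si ++ Sj) (fun x => x) false).countP_eq (fun t => decide (t ≤ s)),
      List.countP_append]
    push_cast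
    ring
  have hcntA : ∀ s : Int, (PySem.List.sorted Si (fun x => x) false).countP (fun t => decide (t ≤ s))
      = Si.countP (fun t => decide (t ≤ s)) :=
    fun s => (PySem.List.sorted_perm Si (fun x => x) false).countP_eq _
  have hcntB : ∀ s : Int, (PySem.List.sorted Sj (fun x => x) false).countP (fun t => decide (t ≤ s))
      = Sj.countP (fun t => decide (t ≤ s)) :=
    fun s => (PySem.List.sorted_perm Sj (fun x => x) false).countP_eq _
  have hsum : ((PySem.List.sorted Si (fun x => x) false).map (fun s =>
        ((Si.countP (fun t => decide (t ≤ s)) : Int) + (Sj.countP (fun t => decide (t ≤ s)) : Int)))).sum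
      = (Si.map (fun s =>
        ((Si.countP (fun t => decide (t ≤ s)) : Int) + (Sj.countP (fun t => decide (t ≤ s)) : Int)))).sum :=
    (((PySem.List.sorted_perm Si (fun x => x) false).map _).sum_eq)
  simp only [hcntA, hcntB]
  rw [hmapA, hsum]

-- ===== VERDICT (by name: the statement is the Claim_ definition above) =====
theorem f_spec : Claim_equal_f := by
  intro Si Sj _
  unfold Spec_f
  exact f_eq_f_alt Si Sj
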